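-- pv_equiv track=rewrite | github.com/adrianclinansmith/LeetCode | test1.py | solution
-- ===== SOURCE A (Python) =====
-- def solution(S):
--     numDeletions = 0
--     numB = 0
--     for ch in S:
--         numB += int(ch == "B")
--         if ch == "A":
--             numDeletions = min(numDeletions + 1, numB)
--     return numDeletions
-- ===== SOURCE B (Python) =====
-- def solution(S):
--     # Split-point formulation: answer = min over all split points k of
--     # (number of 'B' in S[:k]) + (number of 'A' in S[k:]).
--     totalA = S.count("A")
--     best = totalA          # split before the first character
--     prefB = 0
--     suffA = totalA
--     for ch in S:
--         if ch == "B":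
--             prefB += 1
--         elif ch == "A":
--             suffA -= 1
--         best = min(best, prefB + suffA)
--     return best
-- ===== Notes on version B (the rewrite author's own statement) =====
-- stated objective: alternative
-- what changed: Replaces A's online DP recurrence min(numDeletions+1, numB) with the explicit split-point formulation: precompute the total count of 'A', then one scan taking the minimum over all split points of (B's in the prefix + A's in the suffix).
import Mathlib
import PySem

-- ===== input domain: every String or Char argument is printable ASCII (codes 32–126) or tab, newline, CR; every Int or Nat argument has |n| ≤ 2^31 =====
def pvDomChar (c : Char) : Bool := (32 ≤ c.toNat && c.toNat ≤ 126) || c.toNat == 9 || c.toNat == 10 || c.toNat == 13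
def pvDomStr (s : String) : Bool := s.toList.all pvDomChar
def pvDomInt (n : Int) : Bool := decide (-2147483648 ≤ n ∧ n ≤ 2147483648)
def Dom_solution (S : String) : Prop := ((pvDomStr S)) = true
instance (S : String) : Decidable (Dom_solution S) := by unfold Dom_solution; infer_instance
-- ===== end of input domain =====

-- B replaces A's online DP recurrence with the explicit split-point formulation
-- (min over split points of B's-in-prefix + A's-in-suffix); alternative decomposition, same cost.


-- ===== PORT A =====
-- loop body of A: state (numDeletions, numB)
def stepA (st : Int × Int) (ch : Char) : Int × Int :=
  let numB := st.2 + (if ch = 'B' then (1 : Int) else 0)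
  (if ch = 'A' then min (st.1 + 1) numB else st.1, numB)

def solution (S : String) : Int :=
  (S.toList.foldl stepA (0, 0)).1

-- ===== PORT B =====
-- loop body of B: state (best, prefB, suffA)
def stepB (st : Int × Int × Int) (ch : Char) : Int × Int × Int :=
  let prefB := if ch = 'B' then st.2.1 + 1 else st.2.1
  let suffA := if ch = 'B' then st.2.2 else if ch = 'A' then st.2.2 - 1 else st.2.2
  (min st.1 (prefB + suffA), prefB, suffA)

def solution_alt (S : String) : Int :=
  let totalA : Int := (PySem.Str.count S "A" : Int)
  (S.toList.foldl stepB (totalA, 0, totalA)).1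

-- ===== PRECONDITION & SPEC =====
def Spec_solution (S : String) (out : Int) : Prop := out = solution_alt S
instance (S : String) (out : Int) : Decidable (Spec_solution S out) := by unfold Spec_solution; infer_instance

-- ===== CLAIM (what is proved, stated in full; the proofs are below) =====
def Claim_equal_solution : Prop := ∀ (S : String), Dom_solution S → Spec_solution S (solution S)

-- ===== LEMMAS AND PROOFS =====

-- Python's s.count("c") for a single character is the character count of the list.
theorem count_go_single (c : Char) : ∀ (l : List Char) (fuel acc : ℕ), l.length ≤ fuel →
    PySem.Chars.count.go [c] fuel l acc = acc + l.count c := by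
  intro l
  induction l with
  | nil => intro fuel acc h; cases fuel <;> simp [PySem.Chars.count.go]
  | cons a t ih =>
    intro fuel acc h
    cases fuel with
    | zero => simp at h
    | succ f =>
      simp only [PySem.Chars.count.go, List.isPrefixOf, List.count_cons]
      by_cases hc : c = a
      · subst hc; simp [List.length_cons] at h ⊢
        rw [ih f (acc + 1) h]; omega
      · simp [hc, Ne.symm hc] at h ⊢
        rw [ih f acc (by omega)]

theorem count_single (s : List Char) (c : Char) : PySem.Chars.count s [c] = s.count c := by
  simp [PySem.Chars.count, count_go_single c s s.length 0 le_rfl]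

-- Invariant linking the two loops: if A's state is (d, nb) with d ≤ nb and B's
-- state is (d + sA, nb, sA), the final bests differ by the A's not yet consumed.
theorem key (l : List Char) : ∀ (d nb sA : Int), d ≤ nb →
    (l.foldl stepB (d + sA, nb, sA)).1
      = (l.foldl stepA (d, nb)).1 + (sA - (l.count 'A' : Int)) := by
  induction l with
  | nil => intro d nb sA _; simp
  | cons ch t ih =>
    intro d nb sA hdn
    simp only [List.foldl_cons]
    by_cases hB : ch = 'B'
    · subst hB
      rw [show stepB (d + sA, nb, sA) 'B' = (d + sA, nb + 1, sA) by
            simp [stepB]; omega,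
          show stepA (d, nb) 'B' = (d, nb + 1) by simp [stepA]]
      simpa using ih d (nb + 1) sA (by omega)
    · by_cases hA : ch = 'A'
      · subst hA
        rw [show stepB (d + sA, nb, sA) 'A' = (min (d + 1) nb + (sA - 1), nb, sA - 1) by
              simp [stepB]; rcases le_total (d + 1) nb with h | h <;> simp [min_def] <;> omega,
            show stepA (d, nb) 'A' = (min (d + 1) nb, nb) by simp [stepA]]
        rw [ih (min (d + 1) nb) nb (sA - 1) (min_le_right _ _)]
        simp
        ring
      · rw [show stepB (d + sA, nb, sA) ch = (d + sA, nb, sA) by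
              simp [stepB, hB, hA]; omega,
            show stepA (d, nb) ch = (d, nb) by simp [stepA, hB, hA]]
        simpa [List.count_cons, hA] using ih d nb sA hdn

-- ===== VERDICT (by name: the statement is the Claim_ definition above) =====
theorem solution_spec : Claim_equal_solution := by
  intro S _
  unfold Spec_solution solution solution_alt
  have h := key S.toList 0 0 ((PySem.Str.count S "A" : Int)) le_rfl
  simp only [zero_add] at h
  rw [h]
  simp [PySem.Str.count, count_single]
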